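-- pv_equiv track=rewrite | github.com/HaidiChen/Coding | python/bitmanipulation/k_bit_flip.py | k_bit_flip2
-- ===== SOURCE A (Python) =====
-- import collections
--
-- def k_bit_flip2(array, k):
--     queue = collections.deque()
--     result = 0
--
--     for i in range(len(array)):
--         if queue and queue[0] + k == i:
--             queue.popleft()
--
--         if array[i] + len(queue) & 1 == 0:
--             if i + k > len(array):
--                 return -1
--             result += 1
--             queue.append(i)
--
--     return result
-- ===== SOURCE B (Python) =====
-- def k_bit_flip2(array, k):
--     n = len(array)
--     arr = list(array)
--     result = 0
--     for i in range(n):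
--         if arr[i] % 2 == 0:
--             if i + k > n:
--                 return -1
--             for j in range(i, i + k):
--                 arr[j] += 1
--             result += 1
--     return result
-- ===== Notes on version B (the rewrite author's own statement) =====
-- stated objective: simpler
-- what changed: Replaces A's lazy flip bookkeeping (a FIFO deque of active flip start positions with front-expiry checks) by eager brute-force simulation: when a flip is needed, B actually increments all k entries of the window in a copied array, so no auxiliary flip-tracking state exists at all.
-- outside the precondition, e.g. on k_bit_flip2([0, 0], 0): A returns 1, B returns 2
import Mathlib
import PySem

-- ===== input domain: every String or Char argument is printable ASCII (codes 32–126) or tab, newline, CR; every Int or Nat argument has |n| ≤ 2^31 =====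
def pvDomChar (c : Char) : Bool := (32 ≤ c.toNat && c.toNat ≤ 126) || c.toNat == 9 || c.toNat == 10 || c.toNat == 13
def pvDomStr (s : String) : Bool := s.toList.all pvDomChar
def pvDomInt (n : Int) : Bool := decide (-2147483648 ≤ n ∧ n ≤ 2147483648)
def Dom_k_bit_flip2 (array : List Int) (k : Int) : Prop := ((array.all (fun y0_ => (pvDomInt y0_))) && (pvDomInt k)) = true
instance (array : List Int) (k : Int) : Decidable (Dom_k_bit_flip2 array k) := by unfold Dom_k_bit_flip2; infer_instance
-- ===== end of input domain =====

-- B replaces A's lazy deque of active flip positions by eager brute-force simulation that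
-- actually increments the k entries of each flipped window in a copy of the array
-- (simpler, no flip-tracking state; O(n*k) instead of O(n), not faster).
-- B copies the array, so neither version mutates its argument.

-- ===== PORT A =====
-- 'if queue and queue[0] + k == i: queue.popleft()'
def kbfPop (k i : Int) (queue : List Int) : List Int :=
  match queue with
  | q0 :: qs => if q0 + k = i then qs else q0 :: qs
  | [] => []

-- A's loop 'for i in range(len(array))' over state (queue, result); the early 'return -1' ends the recursion.
def kbfLoopA (k n : Int) : List Int → Int → List Int → Int → Int
  | [], _i, _queue, result => result
  | a :: rest, i, queue, result =>
    let queue' := kbfPop k i queue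
    -- 'if array[i] + len(queue) & 1 == 0' (Python parses as (array[i] + len(queue)) & 1; x & 1 = x mod 2, exact for negatives)
    if (a + (queue'.length : Int)) % 2 = 0 then
      if i + k > n then -1
      else kbfLoopA k n rest (i + 1) (queue' ++ [i]) (result + 1)
    else kbfLoopA k n rest (i + 1) queue' result

def k_bit_flip2 (array : List Int) (k : Int) : Int :=
  kbfLoopA k (array.length : Int) array 0 [] 0

-- ===== PORT B =====
-- 'for j in range(i, i+k): arr[j] += 1' on the suffix after position i: add 1 to the first t elements
-- (t = k-1 remaining window cells; Int.toNat makes the empty range of k ≤ 0 exact).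
def kbfAddOneFirst : Nat → List Int → List Int
  | _, [] => []
  | 0, xs => xs
  | t + 1, a :: rs => (a + 1) :: kbfAddOneFirst t rs

lemma kbfAddOneFirst_length (t : Nat) (xs : List Int) :
    (kbfAddOneFirst t xs).length = xs.length := by
  induction xs generalizing t with
  | nil => cases t <;> rfl
  | cons a rs ih => cases t with
    | zero => rfl
    | succ s => simp [kbfAddOneFirst, ih]

-- B's loop: position i scans the (already incremented) suffix; earlier entries are never re-read,
-- so mutating 'arr' is exactly rewriting the tail.
def kbfLoopB (k n : Int) (rest : List Int) (i result : Int) : Int :=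
  match rest with
  | [] => result
  | a :: rs =>
    if a % 2 = 0 then
      if i + k > n then -1
      else kbfLoopB k n (kbfAddOneFirst (k - 1).toNat rs) (i + 1) (result + 1)
    else kbfLoopB k n rs (i + 1) result
termination_by rest.length
decreasing_by
  · simp [kbfAddOneFirst_length]
  · simp

def k_bit_flip2_alt (array : List Int) (k : Int) : Int :=
  kbfLoopB k (array.length : Int) array 0 0

-- ===== PRECONDITION & SPEC =====
-- Pre_ restricts to k ≥ 1, the natural domain of a K-length flip (A still returns for k ≤ 0,
-- but there no behaviour is specified: A keeps every flip active forever while B's empty flip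
-- window changes nothing, and neither reading is more defensible than the other).
def Pre_k_bit_flip2 (array : List Int) (k : Int) : Prop := 1 ≤ k
instance (array : List Int) (k : Int) : Decidable (Pre_k_bit_flip2 array k) := by unfold Pre_k_bit_flip2; infer_instance

def pvWitness_k_bit_flip2 : List Int × Int := ([0, 1, 0, 1], 2)

def Spec_k_bit_flip2 (array : List Int) (k : Int) (out : Int) : Prop := out = k_bit_flip2_alt array k
instance (array : List Int) (k : Int) (out : Int) : Decidable (Spec_k_bit_flip2 array k out) := by unfold Spec_k_bit_flip2; infer_instance

-- ===== CLAIM (what is proved, stated in full; the proofs are below) =====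
def Claim_equal_k_bit_flip2 : Prop := ∀ (array : List Int) (k : Int), Dom_k_bit_flip2 array k → Pre_k_bit_flip2 array k → Spec_k_bit_flip2 array k (k_bit_flip2 array k)

-- ===== LEMMAS AND PROOFS =====

-- number of queued flips q still covering position m (q + k > m)
def kbfCnt (k : Int) (queue : List Int) (m : Int) : Int :=
  (queue.countP (fun q => m < q + k) : Int)

-- B's array suffix from position m, as the original suffix plus the active-flip counts
def kbfApply (k : Int) (queue : List Int) : Int → List Int → List Int
  | _m, [] => []
  | m, a :: rs => (a + kbfCnt k queue m) :: kbfApply k queue (m + 1) rs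

lemma kbfCnt_cons (k q0 : Int) (qs : List Int) (m : Int) :
    kbfCnt k (q0 :: qs) m = kbfCnt k qs m + (if m < q0 + k then 1 else 0) := by
  simp [kbfCnt, List.countP_cons]

lemma kbfCnt_append_singleton (k : Int) (qs : List Int) (q m : Int) :
    kbfCnt k (qs ++ [q]) m = kbfCnt k qs m + (if m < q + k then 1 else 0) := by
  simp [kbfCnt, List.countP_append, List.countP_cons]

lemma kbfCnt_eq_length (k : Int) (qs : List Int) (m : Int) (h : ∀ q ∈ qs, m < q + k) :
    kbfCnt k qs m = (qs.length : Int) := by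
  simp only [kbfCnt]
  norm_cast
  rw [List.countP_eq_length]
  intro q hq
  simpa using h q hq

lemma kbfApply_congr (k : Int) (q1 q2 : List Int) (rs : List Int) (m : Int)
    (h : ∀ j : Int, m ≤ j → kbfCnt k q1 j = kbfCnt k q2 j) :
    kbfApply k q1 m rs = kbfApply k q2 m rs := by
  induction rs generalizing m with
  | nil => rfl
  | cons a rs ih =>
    simp only [kbfApply]
    rw [h m le_rfl, ih (m + 1) (fun j hj => h j (by omega))]

lemma kbfApply_nil (k m : Int) (rs : List Int) : kbfApply k [] m rs = rs := by
  induction rs generalizing m with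
  | nil => rfl
  | cons a l ih => simp [kbfApply, kbfCnt, ih]

-- flipping the window = appending the flip start i to the active set
lemma kbfAddOneFirst_apply (k i : Int) (q : List Int) :
    ∀ (rs : List Int) (m : Int) (t : Nat), m + (t : Int) = i + k →
      kbfAddOneFirst t (kbfApply k q m rs) = kbfApply k (q ++ [i]) m rs := by
  intro rs
  induction rs with
  | nil => intro m t _; cases t <;> rfl
  | cons a rs ih =>
    intro m t ht
    cases t with
    | zero =>
      simp only [kbfApply, kbfAddOneFirst]
      rw [kbfCnt_append_singleton, if_neg (show ¬ m < i + k by omega), add_zero,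
        kbfApply_congr k (q ++ [i]) q rs (m + 1) (fun j hj => by
          rw [kbfCnt_append_singleton, if_neg (by omega), add_zero])]
    | succ s =>
      simp only [kbfApply, kbfAddOneFirst]
      rw [kbfCnt_append_singleton, if_pos (show m < i + k by omega),
        ih (m + 1) s (by push_cast at ht ⊢; omega), add_assoc]

-- Main invariant: A's (queue, result) and B's incremented suffix stay in step.
lemma kbf_loop_eq (k n : Int) (hk : 1 ≤ k) :
    ∀ (rest : List Int) (i : Int) (queue : List Int) (result : Int),
      queue.Pairwise (· < ·) →
      (∀ q ∈ queue, q < i) →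
      (∀ q ∈ queue, i ≤ q + k) →
      kbfLoopA k n rest i queue result = kbfLoopB k n (kbfApply k queue i rest) i result := by
  intro rest
  induction rest with
  | nil => intro i queue result _ _ _; simp [kbfLoopA, kbfLoopB, kbfApply]
  | cons a rest ih =>
    intro i queue result hpw hlt hact
    -- characterize the popped queue
    have key : ∃ queue' : List Int,
        kbfPop k i queue = queue' ∧
        (queue'.length : Int) = kbfCnt k queue i ∧
        queue'.Pairwise (· < ·) ∧ (∀ q ∈ queue', q < i) ∧
        (∀ q ∈ queue', i + 1 ≤ q + k) ∧
        (∀ j, i + 1 ≤ j → kbfCnt k queue j = kbfCnt k queue' j) := by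
      match queue with
      | [] =>
        exact ⟨[], rfl, by simp [kbfCnt], List.Pairwise.nil, by simp, by simp, by simp⟩
      | q0 :: qs =>
        have hq0lt : ∀ q ∈ qs, q0 < q := fun q hq => (List.pairwise_cons.mp hpw).1 q hq
        by_cases hpop : q0 + k = i
        · have hqs : ∀ q ∈ qs, i + 1 ≤ q + k := by
            intro q hq; have := hq0lt q hq; omega
          refine ⟨qs, by simp [kbfPop, hpop], ?_, (List.pairwise_cons.mp hpw).2,
            fun q hq => hlt q (List.mem_cons_of_mem _ hq), hqs, ?_⟩
          · rw [kbfCnt_cons, if_neg (by omega), kbfCnt_eq_length k qs i (fun q hq => by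
              have := hqs q hq; omega)]
            ring
          · intro j hj
            rw [kbfCnt_cons, if_neg (by omega)]
            ring
        · have hq0 : i + 1 ≤ q0 + k := by
            have := hact q0 List.mem_cons_self; omega
          have hall : ∀ q ∈ q0 :: qs, i + 1 ≤ q + k := by
            intro q hq
            rcases List.mem_cons.mp hq with rfl | hq'
            · exact hq0
            · have := hq0lt q hq'; omega
          refine ⟨q0 :: qs, by simp [kbfPop, hpop], ?_, hpw, hlt, hall, fun j _ => rfl⟩
          exact (kbfCnt_eq_length k _ i (fun q hq => by have := hall q hq; omega)).symm
    obtain ⟨queue', hq', hlen, hpw', hlt', hact', hcnt⟩ := key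
    show kbfLoopA k n (a :: rest) i queue result = kbfLoopB k n (kbfApply k queue i (a :: rest)) i result
    rw [kbfLoopA, kbfApply, kbfLoopB]
    rw [hq', ← hlen]
    by_cases hpar : (a + (queue'.length : Int)) % 2 = 0
    · rw [if_pos hpar, if_pos hpar]
      by_cases hret : i + k > n
      · rw [if_pos hret, if_pos hret]
      · rw [if_neg hret, if_neg hret]
        have hre : kbfApply k queue (i + 1) rest = kbfApply k queue' (i + 1) rest :=
          kbfApply_congr k queue queue' rest (i + 1) (fun j hj => hcnt j hj)
        rw [hre, kbfAddOneFirst_apply k i queue' rest (i + 1) (k - 1).toNat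
          (by rw [Int.toNat_of_nonneg (by omega)]; ring)]
        apply ih
        · rw [List.pairwise_append]
          exact ⟨hpw', List.pairwise_singleton _ _,
            by intro q hq b hb; simp at hb; subst hb; exact hlt' q hq⟩
        · intro q hq
          rcases List.mem_append.mp hq with h | h
          · have := hlt' q h; omega
          · simp at h; omega
        · intro q hq
          rcases List.mem_append.mp hq with h | h
          · have := hact' q h; omega
          · simp at h; omega
    · rw [if_neg hpar, if_neg hpar]
      rw [kbfApply_congr k queue queue' rest (i + 1) (fun j hj => hcnt j hj)]
      exact ih (i + 1) queue' result hpw' (fun q hq => by have := hlt' q hq; omega)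
        (fun q hq => by have := hact' q hq; omega)

-- ===== VERDICT (by name: the statement is the Claim_ definition above) =====
theorem k_bit_flip2_spec : Claim_equal_k_bit_flip2 := by
  intro array k _ hk
  show k_bit_flip2 array k = k_bit_flip2_alt array k
  unfold k_bit_flip2 k_bit_flip2_alt
  have := kbf_loop_eq k (array.length : Int) hk array 0 [] 0
    List.Pairwise.nil (by simp) (by simp)
  rwa [kbfApply_nil] at this
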